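-- pv_equiv track=rewrite | github.com/stantonious/bingo-card | card_generator/app.py | _generate_bingo_numbers
-- ===== SOURCE A (Python) =====
-- def _generate_bingo_numbers(ignore=None):
--     ignore = ignore or []
--     B = [x for x in range(1, 16) if x not in ignore]
--     I = [x for x in range(16, 31) if x not in ignore]
--     N = [x for x in range(31, 46) if x not in ignore]
--     G = [x for x in range(46, 61) if x not in ignore]
--     O = [x for x in range(61, 76) if x not in ignore]
--
--     return B, I, N, G, O
-- ===== SOURCE B (Python) =====
-- def _generate_bingo_numbers(ignore=None):
--     ignore = ignore or []
--     cols = [[] for _ in range(5)]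
--     for x in range(1, 76):
--         if x not in ignore:
--             cols[(x - 1) // 15].append(x)
--     return tuple(cols)
-- ===== Notes on version B (the rewrite author's own statement) =====
-- stated objective: alternative
-- what changed: Replaces five separate range-filter comprehensions by one single pass over range(1,76) that dispatches each surviving number into its column bucket via the arithmetic index (x-1)//15.
import Mathlib
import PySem

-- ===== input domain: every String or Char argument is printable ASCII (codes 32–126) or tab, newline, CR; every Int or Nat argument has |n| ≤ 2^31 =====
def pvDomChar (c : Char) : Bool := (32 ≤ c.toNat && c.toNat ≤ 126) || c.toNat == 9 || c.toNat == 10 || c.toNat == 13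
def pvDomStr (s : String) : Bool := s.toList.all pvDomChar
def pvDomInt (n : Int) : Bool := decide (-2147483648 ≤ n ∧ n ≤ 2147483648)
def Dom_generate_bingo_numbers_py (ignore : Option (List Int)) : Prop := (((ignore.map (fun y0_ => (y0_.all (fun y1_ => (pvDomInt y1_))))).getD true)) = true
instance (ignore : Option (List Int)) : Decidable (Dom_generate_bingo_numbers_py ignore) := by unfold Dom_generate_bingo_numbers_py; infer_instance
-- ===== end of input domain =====

-- B replaces the five separate range filters by one pass over range(1,76) dispatching by (x-1)//15 (alternative decomposition, not faster).

-- ===== PORT A =====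
def generate_bingo_numbers_py (ignore : Option (List Int)) : List Int × List Int × List Int × List Int × List Int :=
  -- ignore = ignore or []
  let ig : List Int := match ignore with
    | none => []
    | some l => if l.isEmpty then [] else l
  let B := (PySem.List.pyRange 1 16 1).filter (fun x => !ig.contains x)
  let I := (PySem.List.pyRange 16 31 1).filter (fun x => !ig.contains x)
  let N := (PySem.List.pyRange 31 46 1).filter (fun x => !ig.contains x)
  let G := (PySem.List.pyRange 46 61 1).filter (fun x => !ig.contains x)
  let O := (PySem.List.pyRange 61 76 1).filter (fun x => !ig.contains x)
  (B, I, N, G, O)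

-- ===== PORT B =====
-- step of Source B's loop body: skip x if ignored, else append x to the bucket (x-1)//15
def pvBingoStep (ig : List Int) (acc : List Int × List Int × List Int × List Int × List Int)
    (x : Int) : List Int × List Int × List Int × List Int × List Int :=
  if ig.contains x then acc
  else
    let c := PySem.Int.floordiv (x - 1) 15
    match acc with
    | (b, i, n, g, o) =>
      if c = 0 then (b ++ [x], i, n, g, o)
      else if c = 1 then (b, i ++ [x], n, g, o)
      else if c = 2 then (b, i, n ++ [x], g, o)
      else if c = 3 then (b, i, n, g ++ [x], o)
      else (b, i, n, g, o ++ [x])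

def generate_bingo_numbers_py_alt (ignore : Option (List Int)) : List Int × List Int × List Int × List Int × List Int :=
  let ig : List Int := match ignore with
    | none => []
    | some l => if l.isEmpty then [] else l
  (PySem.List.pyRange 1 76 1).foldl (pvBingoStep ig) ([], [], [], [], [])

-- ===== PRECONDITION & SPEC =====
def Spec_generate_bingo_numbers_py (ignore : Option (List Int)) (out : List Int × List Int × List Int × List Int × List Int) : Prop := out = generate_bingo_numbers_py_alt ignore
instance (ignore : Option (List Int)) (out : List Int × List Int × List Int × List Int × List Int) : Decidable (Spec_generate_bingo_numbers_py ignore out) := by unfold Spec_generate_bingo_numbers_py; infer_instance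

-- ===== CLAIM (what is proved, stated in full; the proofs are below) =====
def Claim_equal_generate_bingo_numbers_py : Prop := ∀ (ignore : Option (List Int)), Dom_generate_bingo_numbers_py ignore → Spec_generate_bingo_numbers_py ignore (generate_bingo_numbers_py ignore)

-- ===== LEMMAS AND PROOFS =====

-- On a segment whose elements all have bucket index c, the fold appends the filtered segment to component c.
lemma pvSeg0 (ig : List Int) (xs : List Int)
    (h : ∀ x ∈ xs, (x - 1) / 15 = (0:Int))
    (b i n g o : List Int) :
    xs.foldl (pvBingoStep ig) (b, i, n, g, o)
      = (b ++ xs.filter (fun x => !ig.contains x), i, n, g, o) := by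
  induction xs generalizing b with
  | nil => simp
  | cons y ys ih =>
    have hy := h y (by simp)
    have ih' := ih (fun x hx => h x (by simp [hx]))
    by_cases hc : y ∈ ig <;>
      simp [List.foldl_cons, pvBingoStep, hc, hy, ih']

lemma pvSeg1 (ig : List Int) (xs : List Int)
    (h : ∀ x ∈ xs, (x - 1) / 15 = (1:Int))
    (b i n g o : List Int) :
    xs.foldl (pvBingoStep ig) (b, i, n, g, o)
      = (b, i ++ xs.filter (fun x => !ig.contains x), n, g, o) := by
  induction xs generalizing i with
  | nil => simp
  | cons y ys ih =>
    have hy := h y (by simp)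
    have ih' := ih (fun x hx => h x (by simp [hx]))
    by_cases hc : y ∈ ig <;>
      simp [List.foldl_cons, pvBingoStep, hc, hy, ih']

lemma pvSeg2 (ig : List Int) (xs : List Int)
    (h : ∀ x ∈ xs, (x - 1) / 15 = (2:Int))
    (b i n g o : List Int) :
    xs.foldl (pvBingoStep ig) (b, i, n, g, o)
      = (b, i, n ++ xs.filter (fun x => !ig.contains x), g, o) := by
  induction xs generalizing n with
  | nil => simp
  | cons y ys ih =>
    have hy := h y (by simp)
    have ih' := ih (fun x hx => h x (by simp [hx]))
    by_cases hc : y ∈ ig <;>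
      simp [List.foldl_cons, pvBingoStep, hc, hy, ih']

lemma pvSeg3 (ig : List Int) (xs : List Int)
    (h : ∀ x ∈ xs, (x - 1) / 15 = (3:Int))
    (b i n g o : List Int) :
    xs.foldl (pvBingoStep ig) (b, i, n, g, o)
      = (b, i, n, g ++ xs.filter (fun x => !ig.contains x), o) := by
  induction xs generalizing g with
  | nil => simp
  | cons y ys ih =>
    have hy := h y (by simp)
    have ih' := ih (fun x hx => h x (by simp [hx]))
    by_cases hc : y ∈ ig <;>
      simp [List.foldl_cons, pvBingoStep, hc, hy, ih']

lemma pvSeg4 (ig : List Int) (xs : List Int)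
    (h : ∀ x ∈ xs, (x - 1) / 15 = (4:Int))
    (b i n g o : List Int) :
    xs.foldl (pvBingoStep ig) (b, i, n, g, o)
      = (b, i, n, g, o ++ xs.filter (fun x => !ig.contains x)) := by
  induction xs generalizing o with
  | nil => simp
  | cons y ys ih =>
    have hy := h y (by simp)
    have ih' := ih (fun x hx => h x (by simp [hx]))
    by_cases hc : y ∈ ig <;>
      simp [List.foldl_cons, pvBingoStep, hc, hy, ih']

-- bucket index of each 15-number segment
lemma pvBucket (c : Int) (x : Int) (h1 : 15 * c + 1 ≤ x) (h2 : x < 15 * c + 16) :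
    (x - 1) / 15 = c := by omega

lemma pvSplit : PySem.List.pyRange 1 76 1
    = PySem.List.pyRange 1 16 1 ++ PySem.List.pyRange 16 31 1 ++ PySem.List.pyRange 31 46 1
      ++ PySem.List.pyRange 46 61 1 ++ PySem.List.pyRange 61 76 1 := by decide

lemma pvMain (ig : List Int) :
    ((PySem.List.pyRange 1 16 1).filter (fun x => !ig.contains x),
     (PySem.List.pyRange 16 31 1).filter (fun x => !ig.contains x),
     (PySem.List.pyRange 31 46 1).filter (fun x => !ig.contains x),
     (PySem.List.pyRange 46 61 1).filter (fun x => !ig.contains x),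
     (PySem.List.pyRange 61 76 1).filter (fun x => !ig.contains x))
      = (PySem.List.pyRange 1 76 1).foldl (pvBingoStep ig) ([], [], [], [], []) := by
  rw [pvSplit]
  rw [List.foldl_append, List.foldl_append, List.foldl_append, List.foldl_append]
  rw [pvSeg0 ig (PySem.List.pyRange 1 16 1) (fun x hx => by
        have := (PySem.List.mem_pyRange_one).1 hx
        exact pvBucket 0 x (by omega) (by omega))]
  rw [pvSeg1 ig (PySem.List.pyRange 16 31 1) (fun x hx => by
        have := (PySem.List.mem_pyRange_one).1 hx
        exact pvBucket 1 x (by omega) (by omega))]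
  rw [pvSeg2 ig (PySem.List.pyRange 31 46 1) (fun x hx => by
        have := (PySem.List.mem_pyRange_one).1 hx
        exact pvBucket 2 x (by omega) (by omega))]
  rw [pvSeg3 ig (PySem.List.pyRange 46 61 1) (fun x hx => by
        have := (PySem.List.mem_pyRange_one).1 hx
        exact pvBucket 3 x (by omega) (by omega))]
  rw [pvSeg4 ig (PySem.List.pyRange 61 76 1) (fun x hx => by
        have := (PySem.List.mem_pyRange_one).1 hx
        exact pvBucket 4 x (by omega) (by omega))]
  simp

-- ===== VERDICT (by name: the statement is the Claim_ definition above) =====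
theorem generate_bingo_numbers_py_spec : Claim_equal_generate_bingo_numbers_py := by
  intro ignore _
  unfold Spec_generate_bingo_numbers_py generate_bingo_numbers_py generate_bingo_numbers_py_alt
  exact pvMain _
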